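-- pv_equiv track=rewrite | github.com/thorkwon/my-scripts | translate2ko_srt.py | get_en_text
-- ===== SOURCE A (Python) =====
-- def get_en_text(lines):
-- 	result_lines = []
-- 	flag = 0 # idx:0 time:1 text:2
--
-- 	for line in lines:
-- 		if flag == 0:
-- 			flag += 1
-- 		elif flag == 1:
-- 			flag += 1
-- 		else:
-- 			if line == "\n":
-- 				result_lines.append(line)
-- 				flag = 0
-- 			else:
-- 				result_lines.append(line)
--
-- 	return result_lines
-- ===== SOURCE B (Python) =====
-- def get_en_text(lines):
--     result = []
--     i = 0
--     n = len(lines)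
--     while i < n:
--         i += 2  # skip the index line and the time line of the block
--         while i < n:
--             line = lines[i]
--             result.append(line)
--             i += 1
--             if line == "\n":
--                 break
--     return result
-- ===== Notes on version B (the rewrite author's own statement) =====
-- stated objective: alternative
-- what changed: Replaced A's single pass with a 3-state flag variable by an explicit-index nested while loop that processes each subtitle block as a unit: skip two header lines, then copy text lines up to and including the blank terminator.
import Mathlib
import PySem

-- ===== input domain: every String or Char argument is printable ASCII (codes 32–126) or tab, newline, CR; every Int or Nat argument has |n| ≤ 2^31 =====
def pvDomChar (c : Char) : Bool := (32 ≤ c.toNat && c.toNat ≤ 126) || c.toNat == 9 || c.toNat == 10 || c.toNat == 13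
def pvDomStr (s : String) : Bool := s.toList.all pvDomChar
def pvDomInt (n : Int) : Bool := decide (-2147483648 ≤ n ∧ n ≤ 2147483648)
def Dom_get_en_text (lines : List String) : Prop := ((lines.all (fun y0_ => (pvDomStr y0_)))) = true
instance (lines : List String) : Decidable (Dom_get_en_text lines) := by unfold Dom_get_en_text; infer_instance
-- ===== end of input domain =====

-- B restructures A's 3-state flag scan into block-at-a-time processing (skip two header
-- lines, then copy text lines up to and including the blank terminator); objective: alternative.

-- ===== PORT A =====
-- one fold over the lines with state (flag, result_lines), exactly A's branch order
def stepA (s : Nat × List String) (line : String) : Nat × List String :=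
  if s.1 = 0 then (s.1 + 1, s.2)
  else if s.1 = 1 then (s.1 + 1, s.2)
  else if line = "\n" then (0, s.2 ++ [line])
  else (s.1, s.2 ++ [line])

def get_en_text (lines : List String) : List String :=
  (lines.foldl stepA (0, [])).2

-- ===== PORT B =====
-- inner while loop of Source B: copy lines, stop after (and including) a "\n"; returns (copied, rest)
def innerB : List String → List String × List String
  | [] => ([], [])
  | l :: ls =>
    if l = "\n" then ([l], ls)
    else
      let p := innerB ls
      (l :: p.1, p.2)

theorem innerB_rest_le : ∀ ls : List String, (innerB ls).2.length ≤ ls.length := by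
  intro ls
  induction ls with
  | nil => simp [innerB]
  | cons l ls ih =>
    simp only [innerB]
    split
    · simp
    · simpa using Nat.le_succ_of_le ih

-- outer while loop of Source B: per block, skip two lines then run the inner loop
def outerB : List String → List String
  | [] => []
  | [_] => []
  | _ :: _ :: ls =>
    let p := innerB ls
    p.1 ++ outerB p.2
termination_by ls => ls.length
decreasing_by
  exact Nat.lt_succ_of_lt (Nat.lt_succ_of_le (innerB_rest_le ls))

def get_en_text_alt (lines : List String) : List String := outerB lines

-- ===== PRECONDITION & SPEC =====
def Spec_get_en_text (lines : List String) (out : List String) : Prop := out = get_en_text_alt lines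
instance (lines : List String) (out : List String) : Decidable (Spec_get_en_text lines out) := by unfold Spec_get_en_text; infer_instance

-- ===== CLAIM (what is proved, stated in full; the proofs are below) =====
def Claim_equal_get_en_text : Prop := ∀ (lines : List String), Dom_get_en_text lines → Spec_get_en_text lines (get_en_text lines)

-- ===== LEMMAS AND PROOFS =====

theorem stepA_0 (acc : List String) (l : String) : stepA (0, acc) l = (1, acc) := by
  simp [stepA]

theorem stepA_1 (acc : List String) (l : String) : stepA (1, acc) l = (2, acc) := by
  simp [stepA]

theorem stepA_2 (acc : List String) (l : String) :
    stepA (2, acc) l = if l = "\n" then (0, acc ++ [l]) else (2, acc ++ [l]) := by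
  simp [stepA]

theorem outerB_nil : outerB [] = [] := by rw [outerB]

theorem outerB_one (a : String) : outerB [a] = [] := by rw [outerB]

theorem outerB_cons (a b : String) (ls : List String) :
    outerB (a :: b :: ls) = (innerB ls).1 ++ outerB (innerB ls).2 := by rw [outerB]

-- combined loop invariant for A's fold started at flag 0, 1 and 2
theorem foldA_inv : ∀ (n : Nat) (ls : List String), ls.length ≤ n →
    (∀ acc, (List.foldl stepA (0, acc) ls).2 = acc ++ outerB ls) ∧
    (∀ acc, (List.foldl stepA (1, acc) ls).2
        = acc ++ (match ls with
                  | [] => []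
                  | _ :: t => (innerB t).1 ++ outerB (innerB t).2)) ∧
    (∀ acc, (List.foldl stepA (2, acc) ls).2 = acc ++ (innerB ls).1 ++ outerB (innerB ls).2) := by
  intro n
  induction n with
  | zero =>
    intro ls hls
    have : ls = [] := List.eq_nil_of_length_eq_zero (Nat.le_zero.mp hls)
    subst this
    simp [outerB_nil, innerB]
  | succ n ih =>
    intro ls hls
    cases ls with
    | nil => simp [outerB_nil, innerB]
    | cons a t =>
      have ht : t.length ≤ n := Nat.le_of_succ_le_succ (by simpa using hls)
      refine ⟨?_, ?_, ?_⟩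
      · -- flag 0: skip a, continue at flag 1
        intro acc
        rw [List.foldl_cons, stepA_0, (ih t ht).2.1 acc]
        cases t with
        | nil => simp [outerB_one]
        | cons b u => simp [outerB_cons]
      · -- flag 1: skip a, continue at flag 2
        intro acc
        rw [List.foldl_cons, stepA_1, (ih t ht).2.2 acc]
        simp
      · -- flag 2: copy a; on "\n" reset to flag 0
        intro acc
        by_cases ha : a = "\n"
        · subst ha
          rw [List.foldl_cons, stepA_2]
          simp only [if_true]
          rw [(ih t ht).1 _]
          simp [innerB]
        · rw [List.foldl_cons, stepA_2, if_neg ha, (ih t ht).2.2 _]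
          simp [innerB, ha]

-- ===== VERDICT (by name: the statement is the Claim_ definition above) =====
theorem get_en_text_spec : Claim_equal_get_en_text := by
  intro lines _
  unfold Spec_get_en_text get_en_text get_en_text_alt
  have := ((foldA_inv lines.length lines le_rfl).1) []
  simpa using this
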